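-- pv_equiv track=rewrite | github.com/versusvoid/pikaur | pikaur/version.py | split_version
-- ===== SOURCE A (Python) =====
-- from typing import Callable, Tuple, List, Optional
--
-- VERSION_SEPARATORS = ('.', '+', '-', ':')
--
-- def split_version(version: str) -> List[str]:
--     splitted_version = []
--     block = ''
--     for char in version:
--         if char in VERSION_SEPARATORS:
--             splitted_version.append(block)
--             splitted_version.append(char)
--             block = ''
--         else:
--             block += char
--     if block != '':
--         splitted_version.append(block)
--     return splitted_version
-- ===== SOURCE B (Python) =====
-- from typing import List
--
-- VERSION_SEPARATORS = ('.', '+', '-', ':')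
--
-- def split_version(version: str) -> List[str]:
--     seps = [(i, char) for i, char in enumerate(version) if char in VERSION_SEPARATORS]
--     parts = []
--     start = 0
--     for i, char in seps:
--         parts += [version[start:i], char]
--         start = i + 1
--     if start < len(version):
--         parts.append(version[start:])
--     return parts
-- ===== Notes on version B (the rewrite author's own statement) =====
-- stated objective: alternative
-- what changed: Replaces A's character-accumulator loop by a two-phase scan: first collect the (index, separator) pairs with a comprehension, then slice the string between consecutive separator positions.
import Mathlib
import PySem

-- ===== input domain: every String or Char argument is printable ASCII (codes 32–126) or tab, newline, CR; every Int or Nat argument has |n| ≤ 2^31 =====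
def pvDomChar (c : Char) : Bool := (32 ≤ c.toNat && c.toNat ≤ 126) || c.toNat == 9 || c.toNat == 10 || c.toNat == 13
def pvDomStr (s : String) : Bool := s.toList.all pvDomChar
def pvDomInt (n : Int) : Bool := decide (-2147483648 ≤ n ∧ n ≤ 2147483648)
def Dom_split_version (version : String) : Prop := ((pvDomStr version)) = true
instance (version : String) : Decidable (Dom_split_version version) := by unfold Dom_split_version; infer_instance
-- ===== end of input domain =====

-- B replaces A's character-accumulator loop by a two-phase scan (collect separator
-- positions, then slice the string between them); objective: alternative decomposition.

-- ===== PORT A =====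
def VERSION_SEPARATORS : List Char := ['.', '+', '-', ':']

-- literal port of A: one pass accumulating the current block char by char
def split_version (version : String) : List String :=
  let st := version.toList.foldl
    (fun (st : List String × List Char) char =>
      if VERSION_SEPARATORS.contains char then
        (st.1 ++ [String.mk st.2, String.mk [char]], [])
      else
        (st.1, st.2 ++ [char]))
    ([], [])
  if st.2 ≠ [] then st.1 ++ [String.mk st.2] else st.1

-- ===== PORT B =====
-- literal port of B: collect (index, char) of separators, then slice between them
def split_version_alt (version : String) : List String :=
  let cs := version.toList
  let seps := (PySem.List.enumerate cs 0).filter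
    (fun p => VERSION_SEPARATORS.contains p.2)
  let st := seps.foldl
    (fun (st : List String × Int) p =>
      (st.1 ++ [String.mk (PySem.List.slice cs (some st.2) (some p.1)), String.mk [p.2]], p.1 + 1))
    ([], 0)
  if st.2 < (cs.length : Int) then
    st.1 ++ [String.mk (PySem.List.slice cs (some st.2) none)]
  else st.1

-- ===== PRECONDITION & SPEC =====
def Spec_split_version (version : String) (out : List String) : Prop := out = split_version_alt version
instance (version : String) (out : List String) : Decidable (Spec_split_version version out) := by unfold Spec_split_version; infer_instance

-- ===== CLAIM (what is proved, stated in full; the proofs are below) =====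
def Claim_equal_split_version : Prop := ∀ (version : String), Dom_split_version version → Spec_split_version version (split_version version)

-- ===== LEMMAS AND PROOFS =====

-- ===== VERDICT (by name: the statement is the Claim_ definition above) =====
-- finishing step of A: append the pending block if nonempty
def finA (st : List String × List Char) : List String :=
  if st.2 ≠ [] then st.1 ++ [String.mk st.2] else st.1

-- finishing step of B: append the tail slice if the string extends past start
def finB (cs : List Char) (st : List String × Int) : List String :=
  if st.2 < (cs.length : Int) then
    st.1 ++ [String.mk (PySem.List.slice cs (some st.2) none)]
  else st.1

theorem main_inv (cs : List Char) :
    ∀ (l : List Char) (k : Nat), cs.drop k = l →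
    ∀ (start : Nat), start ≤ k → ∀ (acc : List String),
    finA (l.foldl
      (fun (st : List String × List Char) char =>
        if VERSION_SEPARATORS.contains char then
          (st.1 ++ [String.mk st.2, String.mk [char]], [])
        else
          (st.1, st.2 ++ [char]))
      (acc, (cs.drop start).take (k - start)))
    = finB cs
      (((PySem.List.enumerate l (k : Int)).filter
          (fun p => VERSION_SEPARATORS.contains p.2)).foldl
        (fun (st : List String × Int) p =>
          (st.1 ++ [String.mk (PySem.List.slice cs (some st.2) (some p.1)), String.mk [p.2]], p.1 + 1))
        (acc, (start : Int))) := by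
  intro l
  induction l with
  | nil =>
    intro k hk start hs acc
    have hlen : cs.length ≤ k := by
      by_contra h
      have := List.drop_eq_nil_iff.mp hk
      omega
    have hblock : (cs.drop start).take (k - start) = cs.drop start := by
      apply List.take_of_length_le
      simp; omega
    simp only [hblock, PySem.List.enumerate, List.filter_nil, List.foldl_nil, finA, finB]
    rw [PySem.List.slice_from cs (by positivity)]
    simp only [Int.toNat_natCast]
    have hiff : (cs.drop start ≠ []) ↔ ((start : Int) < (cs.length : Int)) := by
      rw [ne_eq, List.drop_eq_nil_iff]
      constructor
      · intro h; exact_mod_cast Nat.lt_of_sub_ne_zero (by omega)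
      · intro h; omega
    by_cases hc : cs.drop start = []
    · rw [if_neg (by simpa using hc), if_neg (by rw [← hiff]; simpa using hc)]
    · rw [if_pos hc, if_pos (hiff.mp hc)]
  | cons c t ih =>
    intro k hk start hs acc
    have hklt : k < cs.length := by
      by_contra h
      rw [List.drop_eq_nil_iff.mpr (by omega)] at hk
      exact List.cons_ne_nil _ _ hk.symm
    have hget : cs[k]? = some c := by
      have : (cs.drop k)[0]? = some c := by rw [hk]; rfl
      simpa using this
    have hdropsucc : cs.drop (k + 1) = t := by
      have : (cs.drop k).tail = t := by rw [hk]; rfl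
      simpa [List.tail_drop] using this
    rw [PySem.List.enumerate_cons]
    by_cases hc : VERSION_SEPARATORS.contains c
    · -- separator: both sides emit the block/slice and the separator
      have hslice : PySem.List.slice cs (some (start : Int)) (some (k : Int))
          = (cs.drop start).take (k - start) := by
        rw [PySem.List.slice_natCast]
      simp only [List.foldl_cons, List.filter_cons, hc, if_true, List.foldl_cons]
      have := ih (k + 1) hdropsucc (k + 1) le_rfl
        (acc ++ [String.mk ((cs.drop start).take (k - start)), String.mk [c]])
      simp only [Nat.sub_self, List.take_zero] at this
      rw [hslice]
      convert this using 3
    · -- non-separator: A extends the block, B's filter drops the pair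
      simp only [List.foldl_cons, List.filter_cons, hc, Bool.false_eq_true, if_false]
      have := ih (k + 1) hdropsucc start (by omega) acc
      have hblock : (cs.drop start).take (k - start) ++ [c]
          = (cs.drop start).take (k + 1 - start) := by
        have h1 : k + 1 - start = (k - start) + 1 := by omega
        rw [h1, List.take_succ]
        have : (cs.drop start)[k - start]? = some c := by
          rw [List.getElem?_drop]
          have : start + (k - start) = k := by omega
          rw [this, hget]
        rw [this]
        rfl
      rw [hblock]
      exact this

theorem split_version_spec : Claim_equal_split_version := by
  intro version _
  unfold Spec_split_version split_version split_version_alt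
  have := main_inv version.toList version.toList 0 rfl 0 le_rfl []
  simpa [finA, finB] using this
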